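-- pv_equiv track=rewrite | github.com/shufengtan/brain-extensions | sudoku.py | candidates_ijs
-- ===== SOURCE A (Python) =====
-- def candidates_ijs(dijs, ij2d):
--     ro_rows = set()
--     ro_cols = set()
--     ro_blks = set()
--     for i, j in dijs:
--         ro_rows.add(i)
--         ro_cols.add(j)
--         ro_blks.add((i//3, j//3))
--     cands = []
--     for i in range(9):
--         if i in ro_rows:
--             continue
--         for j in range(9):
--             if j in ro_cols or (i//3, j//3) in ro_blks or (i, j) in ij2d:
--                 continue
--             cands.append((i, j))
--     return cands
-- ===== SOURCE B (Python) =====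
-- def candidates_ijs(dijs, ij2d):
--     forbidden = set(ij2d)
--     for i, j in dijs:
--         bi, bj = i // 3 * 3, j // 3 * 3
--         for k in range(9):
--             forbidden.add((i, k))
--             forbidden.add((k, j))
--             forbidden.add((bi + k // 3, bj + k % 3))
--     universe = {(i, j) for i in range(9) for j in range(9)}
--     return sorted(universe - forbidden)
-- ===== Notes on version B (the rewrite author's own statement) =====
-- stated objective: simpler
-- what changed: Replaces the three per-feature sets (rows/cols/blocks) and the nested skip-loop with one flat forbidden-cell set (seeded from ij2d, expanded cell-by-cell per deletion) and a single set difference against the 9x9 universe, sorted to restore row-major order.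
import Mathlib
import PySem

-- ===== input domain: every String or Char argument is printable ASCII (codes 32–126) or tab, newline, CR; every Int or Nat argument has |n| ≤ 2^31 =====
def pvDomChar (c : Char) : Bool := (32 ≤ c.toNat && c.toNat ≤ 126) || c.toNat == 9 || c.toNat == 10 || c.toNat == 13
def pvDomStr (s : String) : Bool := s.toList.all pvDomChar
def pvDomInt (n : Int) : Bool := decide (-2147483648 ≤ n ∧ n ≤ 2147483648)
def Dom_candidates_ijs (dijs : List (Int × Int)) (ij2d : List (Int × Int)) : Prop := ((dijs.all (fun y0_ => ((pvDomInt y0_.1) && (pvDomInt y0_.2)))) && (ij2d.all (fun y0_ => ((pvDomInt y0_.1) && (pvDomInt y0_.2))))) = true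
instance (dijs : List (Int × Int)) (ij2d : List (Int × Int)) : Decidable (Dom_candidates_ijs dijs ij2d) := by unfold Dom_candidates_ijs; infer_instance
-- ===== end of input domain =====

-- B replaces A's three feature sets (rows/cols/blocks) and nested skip-loop by one flat
-- forbidden-cell set and a sorted set difference against the 9x9 universe (objective: simpler).

-- ===== PORT A =====
def candidates_ijs (dijs : List (Int × Int)) (ij2d : List (Int × Int)) : List (Int × Int) :=
  let sets := dijs.foldl
    (fun (st : PySem.Set Int × PySem.Set Int × PySem.Set (Int × Int)) p =>
      (st.1.add p.1, st.2.1.add p.2,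
       st.2.2.add (PySem.Int.floordiv p.1 3, PySem.Int.floordiv p.2 3)))
    (PySem.Set.empty, PySem.Set.empty, PySem.Set.empty)
  let ro_rows := sets.1
  let ro_cols := sets.2.1
  let ro_blks := sets.2.2
  (PySem.List.pyRange 0 9).foldl (fun cands i =>
    if ro_rows.contains i then cands
    else
      (PySem.List.pyRange 0 9).foldl (fun cands j =>
        if ro_cols.contains j
            || ro_blks.contains (PySem.Int.floordiv i 3, PySem.Int.floordiv j 3)
            || ij2d.contains (i, j) then cands
        else cands ++ [(i, j)]) cands) []

-- ===== PORT B =====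
def candidates_ijs_alt (dijs : List (Int × Int)) (ij2d : List (Int × Int)) : List (Int × Int) :=
  let forbidden := dijs.foldl
    (fun (f : PySem.Set (Int × Int)) p =>
      let bi := PySem.Int.floordiv p.1 3 * 3
      let bj := PySem.Int.floordiv p.2 3 * 3
      (PySem.List.pyRange 0 9).foldl (fun f k =>
        ((f.add (p.1, k)).add (k, p.2)).add
          (bi + PySem.Int.floordiv k 3, bj + PySem.Int.mod k 3)) f)
    (PySem.Set.ofList ij2d)
  let univ := PySem.Set.ofList
    ((PySem.List.pyRange 0 9).flatMap (fun i => (PySem.List.pyRange 0 9).map (fun j => (i, j))))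
  PySem.List.sorted2 (PySem.Set.diff univ forbidden) (fun p => p.1) (fun p => p.2)

-- ===== PRECONDITION & SPEC =====
def Spec_candidates_ijs (dijs : List (Int × Int)) (ij2d : List (Int × Int)) (out : List (Int × Int)) : Prop := out = candidates_ijs_alt dijs ij2d
instance (dijs : List (Int × Int)) (ij2d : List (Int × Int)) (out : List (Int × Int)) : Decidable (Spec_candidates_ijs dijs ij2d out) := by unfold Spec_candidates_ijs; infer_instance

-- ===== CLAIM (what is proved, stated in full; the proofs are below) =====
def Claim_equal_candidates_ijs : Prop := ∀ (dijs : List (Int × Int)) (ij2d : List (Int × Int)), Dom_candidates_ijs dijs ij2d → Spec_candidates_ijs dijs ij2d (candidates_ijs dijs ij2d)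

-- ===== LEMMAS AND PROOFS =====

def pvGrid : List (Int × Int) :=
  (PySem.List.pyRange 0 9).flatMap (fun i => (PySem.List.pyRange 0 9).map (fun j => (i, j)))

def pvF (dijs ij2d : List (Int × Int)) (i j : Int) : Bool :=
  ij2d.contains (i, j) || dijs.any (fun p =>
    p.1 == i || p.2 == j ||
    (PySem.Int.floordiv p.1 3 == PySem.Int.floordiv i 3
      && PySem.Int.floordiv p.2 3 == PySem.Int.floordiv j 3))

theorem mem_foldl_add {α β : Type} [BEq α] [LawfulBEq α] (h : β → α) (l : List β)
    (s : PySem.Set α) (x : α) :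
    x ∈ l.foldl (fun s p => s.add (h p)) s ↔ x ∈ s ∨ ∃ p ∈ l, x = h p := by
  induction l generalizing s with
  | nil => simp
  | cons q t ih => simp [ih, PySem.Set.mem_add, or_assoc]

theorem cell_iff (p : Int × Int) (i j : Int) (hi : 0 ≤ i ∧ i < 9) (hj : 0 ≤ j ∧ j < 9) :
    (∃ k, (0 ≤ k ∧ k < 9) ∧ ((i, j) = (p.1, k) ∨ (i, j) = (k, p.2) ∨
        (i, j) = (PySem.Int.floordiv p.1 3 * 3 + PySem.Int.floordiv k 3,
                  PySem.Int.floordiv p.2 3 * 3 + PySem.Int.mod k 3)))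
      ↔ (p.1 = i ∨ p.2 = j ∨
          (PySem.Int.floordiv p.1 3 = PySem.Int.floordiv i 3
            ∧ PySem.Int.floordiv p.2 3 = PySem.Int.floordiv j 3)) := by
  have h3 : (0:Int) < 3 := by norm_num
  simp only [PySem.Int.floordiv_eq_ediv_of_pos h3, PySem.Int.mod_eq_emod_of_pos h3,
    Prod.mk.injEq]
  constructor
  · rintro ⟨k, hk, h⟩
    omega
  · rintro (h | h | h)
    · exact ⟨j, by omega, by omega⟩
    · exact ⟨i, by omega, by omega⟩
    · refine ⟨(i - p.1 / 3 * 3) * 3 + (j - p.2 / 3 * 3), by omega, by omega⟩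

theorem mem_inner_fold {α β : Type} [BEq α] [LawfulBEq α] (g1 g2 g3 : β → α)
    (ks : List β) (f : PySem.Set α) (x : α) :
    x ∈ ks.foldl (fun f k => ((f.add (g1 k)).add (g2 k)).add (g3 k)) f
      ↔ x ∈ f ∨ ∃ k ∈ ks, x = g1 k ∨ x = g2 k ∨ x = g3 k := by
  induction ks generalizing f with
  | nil => simp
  | cons q t ih => simp [ih, PySem.Set.mem_add, or_assoc]


theorem mem_outer_fold {α β : Type} (step : PySem.Set α → β → PySem.Set α)
    (P : β → α → Prop)
    (hstep : ∀ f p x, x ∈ step f p ↔ x ∈ f ∨ P p x)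
    (l : List β) (s : PySem.Set α) (x : α) :
    x ∈ l.foldl step s ↔ x ∈ s ∨ ∃ p ∈ l, P p x := by
  induction l generalizing s with
  | nil => simp
  | cons q t ih => simp [ih, hstep, or_assoc]

theorem mem_forbidden (dijs ij2d : List (Int × Int)) (x : Int × Int) :
    x ∈ dijs.foldl
        (fun (f : PySem.Set (Int × Int)) p =>
          (PySem.List.pyRange 0 9).foldl (fun f k =>
            ((f.add (p.1, k)).add (k, p.2)).add
              (PySem.Int.floordiv p.1 3 * 3 + PySem.Int.floordiv k 3,
               PySem.Int.floordiv p.2 3 * 3 + PySem.Int.mod k 3)) f)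
        (PySem.Set.ofList ij2d)
      ↔ x ∈ ij2d ∨ ∃ p ∈ dijs, ∃ k, (0 ≤ k ∧ k < 9) ∧
          (x = (p.1, k) ∨ x = (k, p.2) ∨
            x = (PySem.Int.floordiv p.1 3 * 3 + PySem.Int.floordiv k 3,
                 PySem.Int.floordiv p.2 3 * 3 + PySem.Int.mod k 3)) := by
  rw [mem_outer_fold _
    (fun p x => ∃ k, (0 ≤ k ∧ k < 9) ∧
      (x = (p.1, k) ∨ x = (k, p.2) ∨
        x = (PySem.Int.floordiv p.1 3 * 3 + PySem.Int.floordiv k 3,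
             PySem.Int.floordiv p.2 3 * 3 + PySem.Int.mod k 3)))
    (fun f p x => by
      rw [mem_inner_fold]
      simp [PySem.List.mem_pyRange_one])]
  simp [PySem.Set.mem_ofList]

theorem foldl_insertBy_sorted {α : Type} (before : α → α → Bool) :
    ∀ (xs acc : List α), (∀ a ∈ acc, ∀ b ∈ xs, before b a = false) →
    xs.Pairwise (fun a b => before b a = false) →
    xs.foldl (fun acc x => PySem.List.insertBy before x acc) acc = acc ++ xs := by
  intro xs
  induction xs with
  | nil => simp
  | cons x t ih =>
    intro acc hacc hp
    simp only [List.foldl_cons]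
    rw [PySem.List.insertBy_of_forall_not_before _ _ _
      (fun a ha => hacc a ha x (List.mem_cons_self))]
    rw [ih (acc ++ [x]) ?_ (List.Pairwise.of_cons hp)]
    · simp
    · intro a ha b hb
      rcases List.mem_append.1 ha with h | h
      · exact hacc a h b (List.mem_cons_of_mem _ hb)
      · simp at h; subst h
        exact (List.pairwise_cons.1 hp).1 b hb

theorem sorted2_eq_self (xs : List (Int × Int))
    (h : xs.Pairwise (fun a b => a.1 < b.1 ∨ (a.1 = b.1 ∧ a.2 < b.2))) :
    PySem.List.sorted2 xs (fun p => p.1) (fun p => p.2) = xs := by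
  have := foldl_insertBy_sorted
    (fun a b : Int × Int => decide (a.1 < b.1) || !decide (b.1 < a.1) && decide (a.2 < b.2))
    xs [] (by simp) ?_
  · simpa [PySem.List.sorted2] using this
  · refine h.imp ?_
    intro a b hab
    rcases hab with h1 | ⟨h1, h2⟩ <;> simp <;> omega

def pvCanon (dijs ij2d : List (Int × Int)) : List (Int × Int) :=
  (PySem.List.pyRange 0 9).flatMap (fun i =>
    ((PySem.List.pyRange 0 9).filter (fun j => !pvF dijs ij2d i j)).map (fun j => (i, j)))

theorem mem_pvGrid (x : Int × Int) :
    x ∈ pvGrid ↔ (0 ≤ x.1 ∧ x.1 < 9) ∧ (0 ≤ x.2 ∧ x.2 < 9) := by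
  obtain ⟨i, j⟩ := x
  simp [pvGrid, PySem.List.mem_pyRange_one]

theorem pvF_iff (dijs ij2d : List (Int × Int)) (i j : Int) :
    pvF dijs ij2d i j = true ↔ ((i, j) ∈ ij2d ∨ ∃ p ∈ dijs,
      p.1 = i ∨ p.2 = j ∨
        (PySem.Int.floordiv p.1 3 = PySem.Int.floordiv i 3
          ∧ PySem.Int.floordiv p.2 3 = PySem.Int.floordiv j 3)) := by
  simp [pvF, List.any_eq_true, or_assoc]


theorem B_eq_canon (dijs ij2d : List (Int × Int)) :
    candidates_ijs_alt dijs ij2d = pvCanon dijs ij2d := by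
  unfold candidates_ijs_alt
  simp only []
  have hnodup : pvGrid.Nodup := by decide
  have hgrid : PySem.Set.ofList
      ((PySem.List.pyRange 0 9).flatMap (fun i => (PySem.List.pyRange 0 9).map (fun j => (i, j))))
      = pvGrid := by
    rw [show ((PySem.List.pyRange 0 9).flatMap (fun i => (PySem.List.pyRange 0 9).map (fun j => (i, j)))) = pvGrid from rfl]
    exact PySem.Set.ofList_eq_self_of_nodup _ hnodup
  rw [hgrid]
  rw [show ∀ f, PySem.Set.diff pvGrid f = pvGrid.filter (fun x => !f.contains x) from fun f => rfl]
  rw [List.filter_congr (q := fun x => !pvF dijs ij2d x.1 x.2) ?_]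
  · rw [sorted2_eq_self _ ?_]
    · simp [pvGrid, pvCanon, List.filter_flatMap, List.filter_map, Function.comp_def]
    · refine List.Pairwise.sublist List.filter_sublist ?_
      decide
  · intro x hx
    rw [mem_pvGrid] at hx
    have hmem := mem_forbidden dijs ij2d x
    rw [Bool.not_inj_iff, Bool.eq_iff_iff, PySem.Set.contains_iff, hmem, pvF_iff]
    obtain ⟨i, j⟩ := x
    constructor
    · rintro (h | ⟨p, hp, hk⟩)
      · exact Or.inl h
      · exact Or.inr ⟨p, hp, (cell_iff p i j hx.1 hx.2).1 hk⟩
    · rintro (h | ⟨p, hp, hk⟩)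
      · exact Or.inl h
      · exact Or.inr ⟨p, hp, (cell_iff p i j hx.1 hx.2).2 hk⟩


-- inner loop of A: skip-or-append is append of map-filter
theorem foldl_skip_append {α β : Type} (q : β → Bool) (f : β → α) (l : List β) (acc : List α) :
    l.foldl (fun acc x => if q x then acc else acc ++ [f x]) acc
      = acc ++ (l.filter (fun x => !q x)).map f := by
  rw [show (fun (acc : List α) x => if q x then acc else acc ++ [f x])
        = (fun acc x => if !q x then acc ++ [f x] else acc) from by
    funext acc x; cases q x <;> simp]
  exact PySem.List.foldl_append_if _ _ _ _

theorem A_eq_canon (dijs ij2d : List (Int × Int)) :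
    candidates_ijs dijs ij2d = pvCanon dijs ij2d := by
  unfold candidates_ijs
  simp only []
  rw [PySem.List.foldl_prod_mk (fun (s : PySem.Set Int) (p : Int × Int) => s.add p.1)
      (fun (s : PySem.Set Int × PySem.Set (Int × Int)) (p : Int × Int) =>
        (s.1.add p.2, s.2.add (PySem.Int.floordiv p.1 3, PySem.Int.floordiv p.2 3)))]
  rw [PySem.List.foldl_prod_mk (fun (s : PySem.Set Int) (p : Int × Int) => s.add p.2)
      (fun (s : PySem.Set (Int × Int)) (p : Int × Int) =>
        s.add (PySem.Int.floordiv p.1 3, PySem.Int.floordiv p.2 3))]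
  simp only [foldl_skip_append]
  rw [show (fun (cands : List (Int × Int)) i =>
        if (List.foldl (fun (s : PySem.Set Int) (p : Int × Int) => s.add p.1) PySem.Set.empty dijs).contains i = true then cands
        else cands ++
            List.map (Prod.mk i)
              (List.filter
                (fun x =>
                  !((List.foldl (fun (s : PySem.Set Int) (p : Int × Int) => s.add p.2) PySem.Set.empty dijs).contains x ||
                        (List.foldl (fun (s : PySem.Set (Int × Int)) (p : Int × Int) => s.add (PySem.Int.floordiv p.1 3, PySem.Int.floordiv p.2 3))
                              PySem.Set.empty dijs).contains
                          (PySem.Int.floordiv i 3, PySem.Int.floordiv x 3) ||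
                      ij2d.contains (i, x)))
                (PySem.List.pyRange 0 9)))
      = (fun cands i => cands ++
          (if (List.foldl (fun (s : PySem.Set Int) (p : Int × Int) => s.add p.1) PySem.Set.empty dijs).contains i = true then []
           else List.map (Prod.mk i)
              (List.filter
                (fun x =>
                  !((List.foldl (fun (s : PySem.Set Int) (p : Int × Int) => s.add p.2) PySem.Set.empty dijs).contains x ||
                        (List.foldl (fun (s : PySem.Set (Int × Int)) (p : Int × Int) => s.add (PySem.Int.floordiv p.1 3, PySem.Int.floordiv p.2 3))
                              PySem.Set.empty dijs).contains
                          (PySem.Int.floordiv i 3, PySem.Int.floordiv x 3) ||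
                      ij2d.contains (i, x)))
                (PySem.List.pyRange 0 9)))) from by
    funext cands i
    split_ifs <;> simp]
  rw [PySem.List.foldl_append_eq_flatMap]
  rw [List.nil_append]
  unfold pvCanon
  congr 1
  funext i
  by_cases hrow : (List.foldl (fun (s : PySem.Set Int) (p : Int × Int) => s.add p.1) PySem.Set.empty dijs).contains i = true
  · rw [if_pos hrow]
    rw [PySem.Set.contains_iff, mem_foldl_add] at hrow
    symm
    rw [List.map_eq_nil_iff, List.filter_eq_nil_iff]
    intro j hj
    simp only [Bool.not_eq_true, Bool.not_eq_false']
    rw [pvF_iff]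
    rcases hrow with h | ⟨p, hp, hpe⟩
    · simp at h
    · exact Or.inr ⟨p, hp, Or.inl hpe.symm⟩
  · rw [if_neg hrow]
    rw [PySem.Set.contains_iff, mem_foldl_add] at hrow
    simp only [not_or, not_exists, not_and] at hrow
    congr 1
    apply List.filter_congr
    intro j hj
    rw [Bool.not_inj_iff, Bool.eq_iff_iff]
    simp only [Bool.or_eq_true, PySem.Set.contains_iff, mem_foldl_add, pvF_iff, Prod.mk.injEq]
    simp only [PySem.Set.empty, List.not_mem_nil, false_or, List.contains_iff_mem]
    constructor
    · rintro ((⟨p, hp, h⟩ | ⟨p, hp, h1, h2⟩) | h)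
      · exact Or.inr ⟨p, hp, Or.inr (Or.inl h.symm)⟩
      · exact Or.inr ⟨p, hp, Or.inr (Or.inr ⟨h1.symm, h2.symm⟩)⟩
      · exact Or.inl h
    · rintro (h | ⟨p, hp, h1 | h2 | h3⟩)
      · exact Or.inr h
      · exact absurd h1.symm (hrow.2 p hp)
      · exact Or.inl (Or.inl ⟨p, hp, h2.symm⟩)
      · exact Or.inl (Or.inr ⟨p, hp, h3.1.symm, h3.2.symm⟩)

-- ===== VERDICT (by name: the statement is the Claim_ definition above) =====
theorem candidates_ijs_spec : Claim_equal_candidates_ijs := by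
  intro dijs ij2d _
  unfold Spec_candidates_ijs
  rw [A_eq_canon, B_eq_canon]
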